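-- pv_equiv track=rewrite | github.com/kemaldemirel1999/HTTP-Client-with-TCP-Socket-Programming | server.py | getRenameParameterName
-- ===== SOURCE A (Python) =====
-- def getRenameParameterName(data):
--     parameters = data.split("&")
--     oldFileName = ""
--     newName = ""
--
--     for val in parameters:
--         infos = val.split("=")
--         if (infos[0].__eq__("oldFileName")):
--             oldFileName = infos[1]
--         elif(infos[0].__eq__("newName")):
--             newName = infos[1]
--         else:
--             name = infos[1]
--     return oldFileName, newName
-- ===== SOURCE B (Python) =====
-- def getRenameParameterName(data):
--     items = [(infos[0], infos[1]) for infos in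
--              (seg.split("=") for seg in data.split("&"))]
--     oldFileName = next((v for k, v in reversed(items) if k == "oldFileName"), "")
--     newName = next((v for k, v in reversed(items) if k == "newName"), "")
--     return oldFileName, newName
-- ===== Notes on version B (the rewrite author's own statement) =====
-- stated objective: alternative
-- what changed: Replaces A's single forward pass mutating two accumulator variables with staged passes: first parse every segment into a (key, value) pair list, then answer each key by a backward first-match query (next over reversed(items)), which returns the same last-occurrence value; the unused 'name' assignment disappears.
import Mathlib
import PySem

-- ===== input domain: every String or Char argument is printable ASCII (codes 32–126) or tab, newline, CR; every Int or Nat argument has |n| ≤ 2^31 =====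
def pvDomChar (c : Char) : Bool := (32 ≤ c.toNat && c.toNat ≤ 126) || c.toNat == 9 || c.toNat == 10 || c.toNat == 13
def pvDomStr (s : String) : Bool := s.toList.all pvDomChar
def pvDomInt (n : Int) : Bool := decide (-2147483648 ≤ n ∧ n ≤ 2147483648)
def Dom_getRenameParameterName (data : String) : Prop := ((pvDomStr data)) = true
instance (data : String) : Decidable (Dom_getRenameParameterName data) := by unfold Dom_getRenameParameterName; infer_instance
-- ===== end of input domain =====

-- B replaces A's single forward pass with mutable accumulators by staged passes: parse all
-- segments into (key, value) pairs, then a backward first-match query per key (alternative; same cost).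

-- ===== PORT A =====
-- loop body of A: updates the (oldFileName, newName) pair; infos[1] is pyGet? (none = IndexError,
-- outside Pre_; the port keeps the state there)
def pvStepA (st : List Char × List Char) (val : List Char) : List Char × List Char :=
  match PySem.List.pyGet? (PySem.Chars.splitOn val "=".toList) 1 with
  | none => st   -- Python raises IndexError here; such inputs are outside Pre_
  | some v =>
    if PySem.List.pyGetD (PySem.Chars.splitOn val "=".toList) 0 [] = "oldFileName".toList then (v, st.2)
    else if PySem.List.pyGetD (PySem.Chars.splitOn val "=".toList) 0 [] = "newName".toList then (st.1, v)
    else st      -- A's else branch binds 'name'; the result is unchanged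

def getRenameParameterName (data : String) : String × String :=
  let st := (PySem.Chars.splitOn data.toList "&".toList).foldl pvStepA ([], [])
  (String.ofList st.1, String.ofList st.2)

-- ===== PORT B =====
-- parse pass: items = [(infos[0], infos[1]) for infos in (seg.split("=") …)];
-- infos[1] is pyGetD with default [] where Python raises IndexError (outside Pre_)
def pvParse (seg : List Char) : List Char × List Char :=
  (PySem.List.pyGetD (PySem.Chars.splitOn seg "=".toList) 0 [],
   PySem.List.pyGetD (PySem.Chars.splitOn seg "=".toList) 1 [])

-- next((v for k, v in reversed(items) if k == key), ""): backward first match with default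
def pvQuery (items : List (List Char × List Char)) (key : List Char) : List Char :=
  ((items.reverse.find? (fun kv => kv.1 == key)).map Prod.snd).getD []

def getRenameParameterName_alt (data : String) : String × String :=
  let items := (PySem.Chars.splitOn data.toList "&".toList).map pvParse
  (String.ofList (pvQuery items "oldFileName".toList),
   String.ofList (pvQuery items "newName".toList))

-- ===== PRECONDITION & SPEC =====
-- Pre_ excludes inputs with a '&'-segment that splits into fewer than two '='-fields
-- (i.e. contains no '='): there Python A raises IndexError at infos[1].
def Pre_getRenameParameterName (data : String) : Prop :=
  ∀ seg ∈ PySem.Chars.splitOn data.toList "&".toList,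
    2 ≤ (PySem.Chars.splitOn seg "=".toList).length
instance (data : String) : Decidable (Pre_getRenameParameterName data) := by
  unfold Pre_getRenameParameterName; infer_instance

def pvWitness_getRenameParameterName : String := "oldFileName=a&newName=b"

def Spec_getRenameParameterName (data : String) (out : String × String) : Prop := out = getRenameParameterName_alt data
instance (data : String) (out : String × String) : Decidable (Spec_getRenameParameterName data out) := by unfold Spec_getRenameParameterName; infer_instance

-- ===== CLAIM (what is proved, stated in full; the proofs are below) =====
def Claim_equal_getRenameParameterName : Prop := ∀ (data : String), Dom_getRenameParameterName data → Pre_getRenameParameterName data → Spec_getRenameParameterName data (getRenameParameterName data)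

-- ===== LEMMAS AND PROOFS =====

-- proof-side view of B's backward scan: the first matching value, as an Option
def pvFind? (segs : List (List Char)) (key : List Char) : Option (List Char) :=
  match segs with
  | [] => none
  | seg :: rest =>
    if PySem.List.pyGetD (PySem.Chars.splitOn seg "=".toList) 0 [] = key then
      some (PySem.List.pyGetD (PySem.Chars.splitOn seg "=".toList) 1 [])
    else pvFind? rest key

-- B's backward query over the parsed pairs is pvFind? on the raw segments
theorem pvQuery_eq_find (segs : List (List Char)) (key : List Char) :
    pvQuery (segs.map pvParse) key = (pvFind? segs.reverse key).getD [] := by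
  unfold pvQuery
  rw [← List.map_reverse]
  congr 1
  induction segs.reverse with
  | nil => rfl
  | cons s rest ih =>
    simp only [List.map_cons, List.find?_cons, pvFind?, pvParse]
    split <;> rename_i hb
    · rw [if_pos (beq_iff_eq.mp hb)]
      rfl
    · rw [if_neg (by simpa using hb)]
      exact ih

theorem pvFind?_append (xs ys : List (List Char)) (key : List Char) :
    pvFind? (xs ++ ys) key = (pvFind? xs key).or (pvFind? ys key) := by
  induction xs with
  | nil => rfl
  | cons x rest ih =>
    simp only [List.cons_append, pvFind?]
    split_ifs with h
    · rfl
    · exact ih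

-- one step of A equals B's single-segment lookup with the incoming state as fallback
theorem pvStepA_eq (seg : List Char)
    (hlen : 2 ≤ (PySem.Chars.splitOn seg "=".toList).length) (a b : List Char) :
    pvStepA (a, b) seg =
      ((pvFind? [seg] "oldFileName".toList).getD a,
       (pvFind? [seg] "newName".toList).getD b) := by
  have hlen' : 1 < (PySem.Chars.splitOn seg "=".toList).length := hlen
  have hget : PySem.List.pyGet? (PySem.Chars.splitOn seg "=".toList) 1 =
      some (PySem.List.pyGetD (PySem.Chars.splitOn seg "=".toList) 1 []) := by
    rw [show (1 : Int) = ((1 : Nat) : Int) by norm_num,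
      PySem.List.pyGet?_ofNat _ _ hlen', PySem.List.pyGetD_ofNat _ _ _ hlen']
  unfold pvStepA
  rw [hget]
  simp only [pvFind?]
  split_ifs with h1 h2
  · exact absurd (h1.symm.trans h2) (by decide)
  · rfl
  · rfl
  · rfl

theorem pv_or_getD (x y : Option (List Char)) (d : List Char) :
    (x.or y).getD d = x.getD (y.getD d) := by cases x <;> rfl

-- the loop invariant: A's forward fold ends in the last value for each key, with the
-- incoming state as fallback — exactly B's backward first-match with that fallback
theorem pvFold_eq (segs : List (List Char))
    (hpre : ∀ seg ∈ segs, 2 ≤ (PySem.Chars.splitOn seg "=".toList).length) :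
    ∀ (a b : List Char),
      segs.foldl pvStepA (a, b) =
        ((pvFind? segs.reverse "oldFileName".toList).getD a,
         (pvFind? segs.reverse "newName".toList).getD b) := by
  induction segs with
  | nil => intro a b; rfl
  | cons seg rest ih =>
    intro a b
    have hrest : ∀ s ∈ rest, 2 ≤ (PySem.Chars.splitOn s "=".toList).length := by
      intro s hs; exact hpre s (by simp [hs])
    simp only [List.foldl_cons, List.reverse_cons]
    rw [pvStepA_eq seg (hpre seg (by simp)) a b, ih hrest,
      pvFind?_append, pvFind?_append, pv_or_getD, pv_or_getD]

-- ===== VERDICT (by name: the statement is the Claim_ definition above) =====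
theorem getRenameParameterName_spec : Claim_equal_getRenameParameterName := by
  intro data _ hpre
  unfold Spec_getRenameParameterName getRenameParameterName getRenameParameterName_alt
  rw [pvFold_eq _ hpre]
  simp only [pvQuery_eq_find]
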